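-- pv_equiv track=rewrite | github.com/chozeur/CodinGame | challenges/Code_Of_The_Rings/cotr.py | morp
-- ===== SOURCE A (Python) =====
-- def plus(c):
--     if c == 'Z':
--         return ' '
--     elif c == ' ':
--         return 'A'
--     else:
--         return chr(ord(c) + 1)
--
-- def minus(c):
--     if c == 'A':
--         return ' '
--     elif c == ' ':
--         return 'Z'
--     else:
--         return chr(ord(c) - 1)
--
-- def morp(forest, itpos, letter):
--
--     m = p = 0
--     c = forest[itpos]
--     while c != letter:
--         c = minus(c)
--         m+=1
--     c = forest[itpos]
--     while c != letter:
--         c = plus(c)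
--         p+=1
--
--     return 'p' if p < m else 'm'
-- ===== SOURCE B (Python) =====
-- ALPHABET = "ABCDEFGHIJKLMNOPQRSTUVWXYZ "  # 27 cyclic symbols, space after Z
--
-- def morp(forest, itpos, letter):
--     i = ALPHABET.index(forest[itpos])
--     j = ALPHABET.index(letter)
--     p = (j - i) % 27
--     m = (i - j) % 27
--     return 'p' if p < m else 'm'
-- ===== Notes on version B (the rewrite author's own statement) =====
-- stated objective: simpler
-- what changed: Replaced the two symbol-by-symbol counting while-loops over the cyclic 27-symbol alphabet by closed-form modular distances p=(j-i)%27 and m=(i-j)%27 computed from alphabet indices.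
-- outside the precondition, e.g. on morp(['!'], 0, 'A'): A returns 'm', B raises ValueError; on morp(['a'], 0, 'A'): A raises ValueError, B raises ValueError; on morp([], 0, 'A'): A raises IndexError, B raises IndexError
import Mathlib
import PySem

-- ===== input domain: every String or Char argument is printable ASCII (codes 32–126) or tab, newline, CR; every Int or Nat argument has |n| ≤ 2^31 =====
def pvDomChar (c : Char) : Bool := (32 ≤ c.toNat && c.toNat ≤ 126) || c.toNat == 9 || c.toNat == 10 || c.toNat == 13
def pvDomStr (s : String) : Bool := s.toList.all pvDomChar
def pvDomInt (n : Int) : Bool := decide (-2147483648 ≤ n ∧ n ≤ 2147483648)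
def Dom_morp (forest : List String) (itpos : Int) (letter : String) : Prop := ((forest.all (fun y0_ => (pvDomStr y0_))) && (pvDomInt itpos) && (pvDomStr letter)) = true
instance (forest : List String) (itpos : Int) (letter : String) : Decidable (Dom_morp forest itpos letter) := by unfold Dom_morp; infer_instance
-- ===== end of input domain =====

-- B replaces A's two symbol-by-symbol counting loops by closed-form modular distances on the
-- 27-symbol cyclic alphabet (objective: simpler).

-- ===== PORT A =====
-- plus(c): step forward on the cycle A..Z,space.  The else-branch is chr(ord(c)+1): for a
-- non-single-char string Python raises TypeError; that case (unreachable under Pre_) returns c.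
def pvPlus (c : String) : String :=
  if c = "Z" then " "
  else if c = " " then "A"
  else match c.toList with
    | [ch] => String.ofList [Char.ofNat (ch.toNat + 1)]
    | _ => c

-- minus(c): step backward on the cycle.
def pvMinus (c : String) : String :=
  if c = "A" then " "
  else if c = " " then "Z"
  else match c.toList with
    | [ch] => String.ofList [Char.ofNat (ch.toNat - 1)]
    | _ => c

-- the 'while c != letter: c = step(c); k += 1' loop; fuel 27 = cycle length, enough under Pre_.
def pvLoop (step : String → String) : Nat → String → String → Nat → Nat
  | 0, _, _, acc => acc
  | fuel + 1, c, letter, acc =>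
      if c = letter then acc else pvLoop step fuel (step c) letter (acc + 1)

def morp (forest : List String) (itpos : Int) (letter : String) : String :=
  match PySem.List.pyGet? forest itpos with
  | none => ""   -- IndexError in Python; excluded by Pre_
  | some c =>
      let m := pvLoop pvMinus 27 c letter 0
      let p := pvLoop pvPlus 27 c letter 0
      if p < m then "p" else "m"

-- ===== PORT B =====
def pvAlphabet : String := "ABCDEFGHIJKLMNOPQRSTUVWXYZ "

def morp_alt (forest : List String) (itpos : Int) (letter : String) : String :=
  match PySem.List.pyGet? forest itpos with
  | none => ""   -- IndexError in Python; excluded by Pre_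
  | some c =>
      let i := PySem.Str.find pvAlphabet c      -- ALPHABET.index(...): raises (find = -1) outside Pre_
      let j := PySem.Str.find pvAlphabet letter
      let p := PySem.Int.mod (j - i) 27
      let m := PySem.Int.mod (i - j) 27
      if p < m then "p" else "m"

-- ===== PRECONDITION & SPEC =====
-- Pre_ excludes: out-of-range itpos (IndexError in both programs) and inputs whose current cell
-- or target letter is not one of the 27 game symbols A..Z,space — there A raises, diverges, or
-- returns an accidental count from walking the ASCII range into the cycle, while B's
-- ALPHABET.index raises ValueError.
def pvAlpha27 : List String :=
  ["A","B","C","D","E","F","G","H","I","J","K","L","M",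
   "N","O","P","Q","R","S","T","U","V","W","X","Y","Z"," "]

def pvPreB (forest : List String) (itpos : Int) (letter : String) : Bool :=
  match PySem.List.pyGet? forest itpos with
  | none => false
  | some c => pvAlpha27.contains c && pvAlpha27.contains letter

def Pre_morp (forest : List String) (itpos : Int) (letter : String) : Prop :=
  pvPreB forest itpos letter = true
instance (forest : List String) (itpos : Int) (letter : String) : Decidable (Pre_morp forest itpos letter) := by
  unfold Pre_morp; infer_instance

def pvWitness_morp : List String × Int × String := (["A", "Q"], 1, " ")

def Spec_morp (forest : List String) (itpos : Int) (letter : String) (out : String) : Prop := out = morp_alt forest itpos letter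
instance (forest : List String) (itpos : Int) (letter : String) (out : String) : Decidable (Spec_morp forest itpos letter out) := by unfold Spec_morp; infer_instance

-- ===== CLAIM (what is proved, stated in full; the proofs are below) =====
def Claim_equal_morp : Prop := ∀ (forest : List String) (itpos : Int) (letter : String), Dom_morp forest itpos letter → Pre_morp forest itpos letter → Spec_morp forest itpos letter (morp forest itpos letter)

-- ===== LEMMAS AND PROOFS =====

-- A's loop-computed answer equals B's modular-distance answer, for all 27 × 27 symbol pairs.
theorem pvKey :
    (pvAlpha27.all fun c => pvAlpha27.all fun l =>
      (if pvLoop pvPlus 27 c l 0 < pvLoop pvMinus 27 c l 0 then "p" else "m") =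
      (if PySem.Int.mod (PySem.Str.find pvAlphabet l - PySem.Str.find pvAlphabet c) 27 <
          PySem.Int.mod (PySem.Str.find pvAlphabet c - PySem.Str.find pvAlphabet l) 27
       then "p" else "m")) = true := by
  decide

-- ===== VERDICT (by name: the statement is the Claim_ definition above) =====
theorem morp_spec : Claim_equal_morp := by
  intro forest itpos letter _ hpre
  unfold Spec_morp morp morp_alt
  unfold Pre_morp pvPreB at hpre
  cases hget : PySem.List.pyGet? forest itpos with
  | none => simp [hget] at hpre
  | some c =>
      rw [hget] at hpre
      simp only [Bool.and_eq_true, List.contains_eq_mem, decide_eq_true_eq] at hpre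
      obtain ⟨hc, hl⟩ := hpre
      have h := pvKey
      rw [List.all_eq_true] at h
      have h2 := h c hc
      rw [List.all_eq_true] at h2
      have h3 := h2 letter hl
      simpa using h3
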